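-- pv_equiv track=rewrite | github.com/hhqx/leetcode | editor-old1029/cn/220916银联竞赛专场/find_delimiters.py | find_comma
-- ===== SOURCE A (Python) =====
-- def find_comma(str):
--     delimiter = []
--     comma = -1
--     for idx, c in enumerate(str):
--         if c == ',':
--             comma = idx
--         elif c == '=' and comma >= 0:
--             delimiter.append(comma)
--     delimiter += [len(str)]
--     return delimiter
-- ===== SOURCE B (Python) =====
-- def find_comma(str):
--     commas = [i for i, c in enumerate(str) if c == ',']
--     eqs = [i for i, c in enumerate(str) if c == '=']
--     out = []
--     for e in eqs:
--         smaller = [p for p in commas if p < e]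
--         if smaller:
--             out.append(smaller[-1])
--     out.append(len(str))
--     return out
-- ===== Notes on version B (the rewrite author's own statement) =====
-- stated objective: alternative
-- what changed: Replaces A's single pass carrying a last-comma sentinel with two comprehensions collecting the comma positions and the delimiter (equals-sign) positions, then resolving each delimiter independently against the comma-position list.
import Mathlib
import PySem

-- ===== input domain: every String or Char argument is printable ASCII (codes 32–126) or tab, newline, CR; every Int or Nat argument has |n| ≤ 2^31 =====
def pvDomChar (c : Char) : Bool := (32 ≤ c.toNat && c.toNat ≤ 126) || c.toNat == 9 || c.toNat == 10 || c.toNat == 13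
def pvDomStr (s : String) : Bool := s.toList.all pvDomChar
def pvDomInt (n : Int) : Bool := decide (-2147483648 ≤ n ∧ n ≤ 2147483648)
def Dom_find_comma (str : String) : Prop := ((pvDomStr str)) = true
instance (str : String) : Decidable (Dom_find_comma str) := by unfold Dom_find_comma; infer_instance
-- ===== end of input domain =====

-- B re-implements A by collecting the comma positions and the equals-sign positions in two
-- separate passes and resolving each equals sign independently against the comma-position list
-- (alternative decomposition, same cost).

-- ===== PORT A =====
-- loop body of A's single pass: state = (delimiter, comma)
def pvStepA (s : List Int × Int) (ic : Int × Char) : List Int × Int :=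
  if ic.2 = ',' then (s.1, ic.1)
  else if ic.2 = '=' ∧ s.2 ≥ 0 then (s.1 ++ [s.2], s.2)
  else s

def find_comma (str : String) : List Int :=
  let r := (PySem.List.enumerate str.toList 0).foldl pvStepA ([], -1)
  r.1 ++ [(PySem.Str.len str)]

-- ===== PORT B =====
-- '[i for i, c in enumerate(str) if c == t]'
def pvPosOf (cs : List Char) (t : Char) : List Int :=
  (PySem.List.enumerate cs 0).filterMap (fun ic => if ic.2 = t then some ic.1 else none)

-- body of B's loop over eqs: 'smaller = [p for p in commas if p < e]; if smaller: out.append(smaller[-1])'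
-- ('smaller[-1]' on a nonempty list = getLast?, exact)
def pvResolveB (commas : List Int) (out : List Int) (e : Int) : List Int :=
  match (commas.filter (fun p => p < e)).getLast? with
  | some p => out ++ [p]
  | none => out

def find_comma_alt (str : String) : List Int :=
  let commas := pvPosOf str.toList ','
  let eqs := pvPosOf str.toList '='
  let out := eqs.foldl (pvResolveB commas) []
  out ++ [(PySem.Str.len str)]

-- ===== PRECONDITION & SPEC =====
def Spec_find_comma (str : String) (out : List Int) : Prop := out = find_comma_alt str
instance (str : String) (out : List Int) : Decidable (Spec_find_comma str out) := by unfold Spec_find_comma; infer_instance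

-- ===== CLAIM (what is proved, stated in full; the proofs are below) =====
def Claim_equal_find_comma : Prop := ∀ (str : String), Dom_find_comma str → Spec_find_comma str (find_comma str)

-- ===== LEMMAS AND PROOFS =====

-- appending a comma position ≥ every '=' position does not change any resolution
lemma resolveB_stable (commas : List Int) (n : Int) (eqs : List Int) (out : List Int)
    (h : ∀ x ∈ eqs, x ≤ n) :
    eqs.foldl (pvResolveB (commas ++ [n])) out = eqs.foldl (pvResolveB commas) out := by
  apply PySem.List.foldl_congr_mem
  intro acc e he
  unfold pvResolveB
  have hn : ¬ (n < e) := not_lt.mpr (h e he)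
  simp [List.filter_append, hn]

lemma pvPosOf_append (cs : List Char) (c : Char) (t : Char) :
    pvPosOf (cs ++ [c]) t
      = pvPosOf cs t ++ (if c = t then [((cs.length : Int))] else []) := by
  unfold pvPosOf
  rw [PySem.List.enumerate_append]
  by_cases h : c = t <;>
    simp [PySem.List.enumerate_cons, PySem.List.enumerate_nil, List.filterMap_append, h]

-- the main invariant, by reverse induction on the character list
lemma main_inv (cs : List Char) :
    (((PySem.List.enumerate cs 0).foldl pvStepA ([], -1)).2
        = (match (pvPosOf cs ',').getLast? with | some p => p | none => -1))
    ∧ (((PySem.List.enumerate cs 0).foldl pvStepA ([], -1)).1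
        = (pvPosOf cs '=').foldl (pvResolveB (pvPosOf cs ',')) [])
    ∧ (∀ x ∈ pvPosOf cs ',', 0 ≤ x ∧ x < (cs.length : Int))
    ∧ (∀ x ∈ pvPosOf cs '=', x < (cs.length : Int)) := by
  induction cs using List.reverseRecOn with
  | nil => simp [PySem.List.enumerate_nil, pvPosOf]
  | append_singleton cs c ih =>
    obtain ⟨ih1, ih2, ihc, ihe⟩ := ih
    rw [PySem.List.enumerate_append, pvPosOf_append, pvPosOf_append]
    simp only [List.foldl_append, PySem.List.enumerate_cons, PySem.List.enumerate_nil,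
      List.foldl_cons, List.foldl_nil, List.length_append, List.length_cons, List.length_nil,
      Nat.cast_add, Nat.cast_one, zero_add]
    have heq_le : ∀ x ∈ pvPosOf cs '=', x ≤ (cs.length : Int) :=
      fun x hx => le_of_lt (ihe x hx)
    by_cases hcc : c = ','
    · -- new comma at index cs.length
      subst hcc
      refine ⟨?_, ?_, ?_, ?_⟩
      · simp [pvStepA]
      · simp [pvStepA, resolveB_stable _ _ _ _ heq_le, ih2]
      · intro x hx
        simp at hx
        rcases hx with hx | hx
        · exact ⟨(ihc x hx).1, by have := (ihc x hx).2; omega⟩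
        · subst hx
          exact ⟨Int.natCast_nonneg _, by omega⟩
      · intro x hx
        simp at hx
        have := ihe x hx
        omega
    · by_cases hce : c = '='
      · -- new '=' at index cs.length
        subst hce
        have hfilter : (pvPosOf cs ',').filter (fun p => p < (cs.length : Int)) = pvPosOf cs ',' := by
          apply List.filter_eq_self.mpr
          intro x hx
          exact decide_eq_true (ihc x hx).2
        refine ⟨?_, ?_, ?_, ?_⟩
        · simp only [pvStepA]
          rcases hlast : (pvPosOf cs ',').getLast? with _ | p
          · have h2 : ((PySem.List.enumerate cs 0).foldl pvStepA ([], -1)).2 = -1 := by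
              simp [ih1, hlast]
            simp [h2, hlast]
          · have h2 : ((PySem.List.enumerate cs 0).foldl pvStepA ([], -1)).2 = p := by
              simp [ih1, hlast]
            simp only [h2]
            split_ifs <;> simp [h2, hlast]
        · have hres : ∀ out, pvResolveB (pvPosOf cs ',') out ((cs.length : Int))
              = (match (pvPosOf cs ',').getLast? with | some p => out ++ [p] | none => out) := by
            intro out
            unfold pvResolveB
            rw [hfilter]
        -- resolve the new '=' against the unchanged comma list
          rcases hlast : (pvPosOf cs ',').getLast? with _ | p
          · have h2 : ((PySem.List.enumerate cs 0).foldl pvStepA ([], -1)).2 = -1 := by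
              simp [ih1, hlast]
            simp [pvStepA, h2, hres, hlast, ih2]
          · have hp : 0 ≤ p := (ihc p (List.mem_of_getLast? hlast)).1
            have h2 : ((PySem.List.enumerate cs 0).foldl pvStepA ([], -1)).2 = p := by
              simp [ih1, hlast]
            simp [pvStepA, h2, hp, hres, hlast, ih2]
        · intro x hx
          simp at hx
          exact ⟨(ihc x hx).1, by have := (ihc x hx).2; omega⟩
        · intro x hx
          simp at hx
          rcases hx with hx | hx
          · have := ihe x hx; omega
          · subst hx; omega
      · -- other character: nothing changes
        refine ⟨?_, ?_, ?_, ?_⟩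
        · simp [pvStepA, hcc, hce, ih1]
        · simp [pvStepA, hcc, hce, ih2]
        · intro x hx
          simp [hcc] at hx
          exact ⟨(ihc x hx).1, by have := (ihc x hx).2; omega⟩
        · intro x hx
          simp [hce] at hx
          have := ihe x hx
          omega

-- ===== VERDICT (by name: the statement is the Claim_ definition above) =====
theorem find_comma_spec : Claim_equal_find_comma := by
  intro str _
  unfold Spec_find_comma find_comma find_comma_alt
  exact congrArg (· ++ [PySem.Str.len str]) (main_inv str.toList).2.1
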